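-- pv_equiv track=rewrite | github.com/AndrewKozyrev/PYTHON | darts3000.py | anchoredSum
-- ===== SOURCE A (Python) =====
-- def anchoredSum(subchain):
--     parts = []
--     maxsofar = p1 = 0
--     for x in subchain:
--         p1 = p1 + x
--         maxsofar = max(maxsofar, p1)
--     parts.append(maxsofar)
--     subchain.reverse()
--     maxsofar = p2 = 0
--     for x in subchain:
--         p2 = p2 + x
--         maxsofar = max(maxsofar, p2)
--     parts.append(maxsofar)
--     return max(parts)
-- ===== SOURCE B (Python) =====
-- def anchoredSum(subchain):
--     # Single pass: max anchored-suffix sum = total - min prefix sum.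
--     # Keep A's observable in-place reversal; the result is symmetric under it.
--     subchain.reverse()
--     s = best = low = 0
--     for x in subchain:
--         s += x
--         if s > best:
--             best = s
--         if s < low:
--             low = s
--     return max(best, s - low)
-- ===== Notes on version B (the rewrite author's own statement) =====
-- stated objective: faster
-- what changed: A runs two max-prefix scans (one over the list, one over its reversal); B makes a single pass tracking running sum, max prefix and min prefix, returning max(best_prefix, total - min_prefix) via the suffix = total - prefix identity (the one reverse() is kept only for A's in-place side effect).
import Mathlib
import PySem

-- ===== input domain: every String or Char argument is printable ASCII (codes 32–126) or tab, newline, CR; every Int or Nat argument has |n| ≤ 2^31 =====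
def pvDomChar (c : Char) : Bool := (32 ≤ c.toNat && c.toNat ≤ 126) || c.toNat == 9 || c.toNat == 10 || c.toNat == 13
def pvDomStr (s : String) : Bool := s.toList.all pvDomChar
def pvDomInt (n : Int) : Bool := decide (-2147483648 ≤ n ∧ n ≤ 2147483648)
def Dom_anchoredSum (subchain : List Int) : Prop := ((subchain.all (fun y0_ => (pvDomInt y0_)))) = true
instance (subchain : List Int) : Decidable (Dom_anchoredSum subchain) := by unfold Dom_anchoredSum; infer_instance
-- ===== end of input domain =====

-- B replaces A's two max-prefix scans by one pass using suffix = total - prefix (objective: alternative).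
-- NOTE: the Python A reverses its argument in place (B reproduces that mutation); the equivalence proved
-- here is about the RETURN value.

-- ===== PORT A =====
-- two scans: max prefix sum of subchain, then of its reversal; max(parts) of the two-element parts list is max m1 m2
def anchoredSum (subchain : List Int) : Int :=
  let m1 := (subchain.foldl (fun (mp : Int × Int) x => (max mp.1 (mp.2 + x), mp.2 + x)) (0, 0)).1
  let rev := subchain.reverse
  let m2 := (rev.foldl (fun (mp : Int × Int) x => (max mp.1 (mp.2 + x), mp.2 + x)) (0, 0)).1
  max m1 m2

-- ===== PORT B =====
-- one pass over the (reversed) list tracking (running sum, best prefix, lowest prefix)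
def anchoredSum_alt (subchain : List Int) : Int :=
  let rev := subchain.reverse
  let st := rev.foldl
    (fun (st : Int × Int × Int) x =>
      let s := st.1 + x
      (s, if s > st.2.1 then s else st.2.1, if s < st.2.2 then s else st.2.2))
    (0, 0, 0)
  max st.2.1 (st.1 - st.2.2)

-- ===== PRECONDITION & SPEC =====
def Spec_anchoredSum (subchain : List Int) (out : Int) : Prop := out = anchoredSum_alt subchain
instance (subchain : List Int) (out : Int) : Decidable (Spec_anchoredSum subchain out) := by unfold Spec_anchoredSum; infer_instance

-- ===== CLAIM (what is proved, stated in full; the proofs are below) =====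
def Claim_equal_anchoredSum : Prop := ∀ (subchain : List Int), Dom_anchoredSum subchain → Spec_anchoredSum subchain (anchoredSum subchain)

-- ===== LEMMAS AND PROOFS =====

-- max prefix sum (over all prefixes, including the empty one)
def mpf : List Int → Int
  | [] => 0
  | x :: t => max 0 (x + mpf t)

-- min prefix sum (over all prefixes, including the empty one)
def mnf : List Int → Int
  | [] => 0
  | x :: t => min 0 (x + mnf t)

lemma mpf_nonneg : ∀ xs : List Int, 0 ≤ mpf xs
  | [] => le_refl 0
  | _ :: t => by simp [mpf]

lemma mnf_nonpos : ∀ xs : List Int, mnf xs ≤ 0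
  | [] => le_refl 0
  | _ :: t => by simp [mnf]

lemma mpf_append_singleton : ∀ (zs : List Int) (y : Int),
    mpf (zs ++ [y]) = max (mpf zs) (zs.sum + y)
  | [], y => by simp [mpf]
  | z :: zs, y => by
    simp only [List.cons_append, mpf, mpf_append_singleton zs y, List.sum_cons]
    omega

-- suffix = total - prefix, read through reversal
lemma sum_sub_mnf : ∀ ys : List Int, ys.sum - mnf ys = mpf ys.reverse
  | [] => by simp [mpf, mnf]
  | y :: t => by
    have ih := sum_sub_mnf t
    simp only [List.sum_cons, mnf, List.reverse_cons, mpf_append_singleton, List.sum_reverse]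
    omega

-- A's scan computes max m (p + mpf xs) when the invariant p ≤ m holds
lemma foldA_spec : ∀ (xs : List Int) (m p : Int), p ≤ m →
    (xs.foldl (fun (mp : Int × Int) x => (max mp.1 (mp.2 + x), mp.2 + x)) (m, p)).1
      = max m (p + mpf xs)
  | [], m, p, h => by simp [mpf]; omega
  | x :: t, m, p, h => by
    have ih := foldA_spec t (max m (p + x)) (p + x) (le_max_right _ _)
    have hn := mpf_nonneg t
    simp only [List.foldl_cons, ih, mpf]
    omega

-- B's scan: running sum, floored-max prefix, floored-min prefix
lemma foldB_spec : ∀ (xs : List Int) (s mx mn : Int), s ≤ mx → mn ≤ s →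
    xs.foldl
      (fun (st : Int × Int × Int) x =>
        let s := st.1 + x
        (s, if s > st.2.1 then s else st.2.1, if s < st.2.2 then s else st.2.2))
      (s, mx, mn)
      = (s + xs.sum, max mx (s + mpf xs), min mn (s + mnf xs))
  | [], s, mx, mn, h1, h2 => by
    simp [mpf, mnf]; constructor <;> omega
  | x :: t, s, mx, mn, h1, h2 => by
    have hp := mpf_nonneg t
    have hn := mnf_nonpos t
    have ih := foldB_spec t (s + x) (if s + x > mx then s + x else mx)
      (if s + x < mn then s + x else mn) (by split <;> omega) (by split <;> omega)
    simp only [List.foldl_cons, List.sum_cons, mpf, mnf] at ih ⊢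
    rw [ih]
    refine Prod.ext (by ring) (Prod.ext ?_ ?_) <;> simp only [] <;> split <;> omega

lemma anchoredSum_eq (xs : List Int) :
    anchoredSum xs = max (mpf xs) (mpf xs.reverse) := by
  have h1 := mpf_nonneg xs
  have h2 := mpf_nonneg xs.reverse
  simp only [anchoredSum, foldA_spec _ 0 0 le_rfl]
  omega

lemma anchoredSum_alt_eq (xs : List Int) :
    anchoredSum_alt xs = max (mpf xs.reverse) (mpf xs) := by
  have h := foldB_spec xs.reverse 0 0 0 le_rfl le_rfl
  have h1 := mpf_nonneg xs.reverse
  have h2 := mnf_nonpos xs.reverse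
  have hs := sum_sub_mnf xs.reverse
  rw [List.reverse_reverse] at hs
  simp only [anchoredSum_alt, h]
  omega

-- ===== VERDICT (by name: the statement is the Claim_ definition above) =====
theorem anchoredSum_spec : Claim_equal_anchoredSum := by
  intro xs _
  unfold Spec_anchoredSum
  rw [anchoredSum_eq, anchoredSum_alt_eq, max_comm]
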